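-- pv_equiv track=rewrite | github.com/Junaid112/Natural_Language_Processing | namedEntityrecognitionWithICrossTextRelation/trained_annotator_NamedEntityRecognition_textRelation.py | converToProperIOB
-- ===== SOURCE A (Python) =====
-- def converToProperIOB(sentence):
--     """
--     `annotated_sentence` are list of triplets ,Transform a pseudo-IOB notation to proper IOB notation: O, B-PERSON, I-PERSON, O, O, B-LOCATION, O
--     """
--     transformedIOBTokken = []
--     for indexOt, token in enumerate(sentence):
--         tag, word, NER = token
--
--         if NER != 'O':
--             if indexOt == 0:
--                 NER = "B-" + NER
--             elif sentence[indexOt - 1][2] == NER: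
--                 NER = "I-" + NER
--             else:
--                 NER = "B-" + NER
--         transformedIOBTokken.append((tag, word, NER))
--     return transformedIOBTokken
-- ===== SOURCE B (Python) =====
-- def converToProperIOB(sentence):
--     """Run-based rewrite: partition the sentence into maximal consecutive runs
--     of equal NER; a non-'O' run becomes B- for its first token and I- for the
--     rest, an 'O' run is copied unchanged."""
--     out = []
--     i = 0
--     n = len(sentence)
--     while i < n:
--         ner = sentence[i][2]
--         j = i + 1
--         while j < n and sentence[j][2] == ner:
--             j += 1
--         if ner == 'O':
--             out.extend(sentence[i:j])
--         else:
--             tag, word, _ = sentence[i]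
--             out.append((tag, word, "B-" + ner))
--             for tag, word, _ in sentence[i + 1:j]:
--                 out.append((tag, word, "I-" + ner))
--         i = j
--     return out
-- ===== Notes on version B (the rewrite author's own statement) =====
-- stated objective: alternative
-- what changed: B partitions the sentence into maximal runs of equal NER and labels each run at once (B- head, I- rest, 'O' runs copied), instead of A's per-index loop that re-reads the previous element of the list to decide B- vs I-.
import Mathlib
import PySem

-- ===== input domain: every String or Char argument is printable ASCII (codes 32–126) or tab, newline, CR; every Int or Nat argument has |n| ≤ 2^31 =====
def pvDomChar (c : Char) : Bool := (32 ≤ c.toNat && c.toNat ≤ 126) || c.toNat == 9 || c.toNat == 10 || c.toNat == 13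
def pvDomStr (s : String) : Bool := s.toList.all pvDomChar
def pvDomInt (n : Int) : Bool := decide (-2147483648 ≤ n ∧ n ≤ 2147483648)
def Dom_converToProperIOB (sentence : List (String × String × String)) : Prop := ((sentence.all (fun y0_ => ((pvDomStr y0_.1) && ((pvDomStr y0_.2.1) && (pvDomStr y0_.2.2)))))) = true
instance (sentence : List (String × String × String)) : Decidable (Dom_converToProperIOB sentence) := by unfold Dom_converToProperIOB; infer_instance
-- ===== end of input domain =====

-- B relabels maximal runs of equal NER at once instead of A's per-index look-back; objective: alternative decomposition.

-- ===== PORT A =====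
-- A's for-loop over enumerate(sentence), as structural recursion carrying the
-- running index and the accumulator; the elif re-reads sentence[indexOt-1][2].
def pvALoop (sentence : List (String × String × String)) :
    Nat → List (String × String × String) → List (String × String × String) →
    List (String × String × String)
  | _, acc, [] => acc
  | indexOt, acc, token :: rest =>
      let tag := token.1
      let word := token.2.1
      let NER := token.2.2
      let NER' :=
        if NER ≠ "O" then
          if indexOt = 0 then "B-" ++ NER
          else if (sentence.getD (indexOt - 1) ("", "", "")).2.2 = NER then "I-" ++ NER
          else "B-" ++ NER
        else NER
      pvALoop sentence (indexOt + 1) (acc ++ [(tag, word, NER')]) rest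

def converToProperIOB (sentence : List (String × String × String)) : List (String × String × String) :=
  pvALoop sentence 0 [] sentence

-- ===== PORT B =====
-- Source B's outer while: peel off the maximal run of the head's NER, emit it
-- relabelled, recurse on the remainder.
def pvBRuns : List (String × String × String) → List (String × String × String)
  | [] => []
  | x :: rest =>
      let ner := x.2.2
      let run := rest.takeWhile (fun y => y.2.2 == ner)
      let tail := rest.dropWhile (fun y => y.2.2 == ner)
      (if ner == "O" then x :: run
       else (x.1, x.2.1, "B-" ++ ner) :: run.map (fun y => (y.1, y.2.1, "I-" ++ ner))) ++
        pvBRuns tail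
termination_by l => l.length
decreasing_by
  simp only [List.length_cons]
  exact Nat.lt_succ_of_le (List.length_dropWhile_le _ _)

def converToProperIOB_alt (sentence : List (String × String × String)) : List (String × String × String) :=
  pvBRuns sentence

-- ===== PRECONDITION & SPEC =====
def Spec_converToProperIOB (sentence : List (String × String × String)) (out : List (String × String × String)) : Prop := out = converToProperIOB_alt sentence
instance (sentence : List (String × String × String)) (out : List (String × String × String)) : Decidable (Spec_converToProperIOB sentence out) := by unfold Spec_converToProperIOB; infer_instance

-- ===== CLAIM (what is proved, stated in full; the proofs are below) =====
def Claim_equal_converToProperIOB : Prop := ∀ (sentence : List (String × String × String)), Dom_converToProperIOB sentence → Spec_converToProperIOB sentence (converToProperIOB sentence)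

-- ===== LEMMAS AND PROOFS =====

-- what A does to one token, given the previous token's NER (none at index 0)
def pvF (prev : Option String) (x : String × String × String) : String × String × String :=
  if x.2.2 ≠ "O" then
    if prev = some x.2.2 then (x.1, x.2.1, "I-" ++ x.2.2) else (x.1, x.2.1, "B-" ++ x.2.2)
  else x

def pvMapPrev (prev : Option String) : List (String × String × String) → List (String × String × String)
  | [] => []
  | x :: rest => pvF prev x :: pvMapPrev (some x.2.2) rest

theorem pvALoop_eq (sentence : List (String × String × String)) :
    ∀ (rest pre acc : List (String × String × String)), sentence = pre ++ rest →
      pvALoop sentence pre.length acc rest =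
        acc ++ pvMapPrev (pre.getLast?.map (·.2.2)) rest := by
  intro rest
  induction rest with
  | nil => intro pre acc h; simp [pvALoop, pvMapPrev]
  | cons x rest ih =>
    intro pre acc h
    obtain ⟨t, w, nr⟩ := x
    have hlast : pre.length ≠ 0 →
        (sentence.getD (pre.length - 1) ("", "", "")) = pre.getLast?.getD ("", "", "") := by
      intro hne
      have hlt : pre.length - 1 < pre.length := by omega
      have hg : sentence[pre.length - 1]? = pre.getLast? := by
        subst h
        rw [List.getElem?_append_left hlt, ← List.getLast?_eq_getElem?]
      rw [List.getD_eq_getElem?_getD, hg]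
    have step : pvALoop sentence pre.length acc ((t, w, nr) :: rest) =
        pvALoop sentence (pre.length + 1) (acc ++ [pvF (pre.getLast?.map (·.2.2)) (t, w, nr)]) rest := by
      simp only [pvALoop, pvF]
      congr 2
      by_cases hO : nr = "O"
      · simp [hO]
      · simp only [hO, ne_eq, not_false_iff, if_pos]
        rcases pre.eq_nil_or_concat with hnil | ⟨p, y, hc⟩
        · simp [hnil]
        · have hne : pre.length ≠ 0 := by simp [hc]
          rw [hlast hne, hc]
          simp only [List.concat_eq_append, List.getLast?_concat, Option.getD_some, Option.map_some]
          split_ifs with h1 h2 h3 <;> simp_all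
    rw [step]
    have h2 : sentence = (pre ++ [(t, w, nr)]) ++ rest := by simpa using h
    have := ih (pre ++ [(t, w, nr)]) (acc ++ [pvF (pre.getLast?.map (·.2.2)) (t, w, nr)]) h2
    simp only [List.length_append, List.length_cons, List.length_nil] at this
    rw [this]
    simp [pvMapPrev]

theorem pvMapPrev_run (n : String) :
    ∀ (rest : List (String × String × String)),
      pvMapPrev (some n) rest =
        (rest.takeWhile (fun y => y.2.2 == n)).map
            (fun y => if n == "O" then y else (y.1, y.2.1, "I-" ++ n)) ++
          pvMapPrev (some n) (rest.dropWhile (fun y => y.2.2 == n)) := by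
  intro rest
  induction rest with
  | nil => simp [pvMapPrev]
  | cons x rest ih =>
    by_cases hx : x.2.2 = n
    · rw [List.takeWhile_cons_of_pos (by simp [hx]), List.dropWhile_cons_of_pos (by simp [hx])]
      simp only [pvMapPrev, List.map_cons, List.cons_append, hx]
      rw [← hx] at ih ⊢
      rw [ih]
      congr 1
      by_cases hO : x.2.2 = "O" <;> simp [pvF, hO]
    · rw [List.takeWhile_cons_of_neg (by simp [hx]), List.dropWhile_cons_of_neg (by simp [hx])]
      simp

theorem pvMapPrev_eq_pvBRuns (l : List (String × String × String)) (prev : Option String)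
    (hprev : ∀ x t, l = x :: t → prev ≠ some x.2.2) :
    pvMapPrev prev l = pvBRuns l := by
  match l with
  | [] => simp [pvMapPrev, pvBRuns]
  | x :: rest =>
    have hpx : prev ≠ some x.2.2 := hprev x rest rfl
    have htail : ∀ y t, rest.dropWhile (fun y => y.2.2 == x.2.2) = y :: t →
        (some x.2.2 : Option String) ≠ some y.2.2 := by
      intro y t hd habs
      have hne := List.head?_dropWhile_not (fun y => y.2.2 == x.2.2) rest
      rw [hd] at hne
      simp at hne
      injection habs with hh
      exact hne hh.symm
    have ihtail := pvMapPrev_eq_pvBRuns (rest.dropWhile (fun y => y.2.2 == x.2.2)) (some x.2.2) htail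
    simp only [pvMapPrev, pvBRuns]
    rw [pvMapPrev_run x.2.2 rest, ihtail]
    by_cases hO : x.2.2 = "O"
    · simp [pvF, hO]
    · simp [pvF, hO, hpx]
termination_by l.length
decreasing_by
  simp only [List.length_cons]
  exact Nat.lt_succ_of_le (List.length_dropWhile_le _ _)

-- ===== VERDICT (by name: the statement is the Claim_ definition above) =====
theorem converToProperIOB_spec : Claim_equal_converToProperIOB := by
  intro sentence _
  show converToProperIOB sentence = converToProperIOB_alt sentence
  unfold converToProperIOB converToProperIOB_alt
  have h := pvALoop_eq sentence sentence [] [] (by simp)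
  simp only [List.length_nil, List.nil_append, List.getLast?_nil, Option.map_none] at h
  rw [h]
  exact pvMapPrev_eq_pvBRuns sentence none (by intro x t _ h; cases h)
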